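-- pv_equiv track=rewrite | github.com/fahadnayyar/codechef | q4try2.py | giveNcr
-- ===== SOURCE A (Python) =====
-- def giveNcr(n,p1):
-- 	ret = [[0 for x in range(n+1)] for x in range(n+1)]
-- 	for i in range(n+1):
-- 		for j in range(i+1):
-- 			if (j==0 or j==i):
-- 				ret[i][j]=1
-- 			else:
-- 				ret[i][j]=(ret[i-1][j-1]%p1+ret[i-1][j]%p1)%p1
-- 	return ret
-- ===== SOURCE B (Python) =====
-- def giveNcr(n, p1):
--     # Column-major fill with a running accumulator: column 0 is all ones,
--     # then each column j is a prefix-sum (mod p1) of column j-1 swept downward.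
--     size = n + 1
--     ret = [[0] * size for _ in range(size)]
--     for i in range(size):
--         ret[i][0] = 1
--     for j in range(1, size):
--         ret[j][j] = 1
--         acc = 1
--         for i in range(j + 1, size):
--             acc = (acc + ret[i - 1][j - 1]) % p1
--             ret[i][j] = acc
--     return ret
-- ===== Notes on version B (the rewrite author's own statement) =====
-- stated objective: alternative
-- what changed: B fills the table column-by-column with a running accumulator (each column is a downward prefix-sum mod p1 of the previous column), instead of A's row-by-row pass that reads and reduces two cells of the previous row per entry; one matrix read and one mod per cell instead of two of each.
import Mathlib
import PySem

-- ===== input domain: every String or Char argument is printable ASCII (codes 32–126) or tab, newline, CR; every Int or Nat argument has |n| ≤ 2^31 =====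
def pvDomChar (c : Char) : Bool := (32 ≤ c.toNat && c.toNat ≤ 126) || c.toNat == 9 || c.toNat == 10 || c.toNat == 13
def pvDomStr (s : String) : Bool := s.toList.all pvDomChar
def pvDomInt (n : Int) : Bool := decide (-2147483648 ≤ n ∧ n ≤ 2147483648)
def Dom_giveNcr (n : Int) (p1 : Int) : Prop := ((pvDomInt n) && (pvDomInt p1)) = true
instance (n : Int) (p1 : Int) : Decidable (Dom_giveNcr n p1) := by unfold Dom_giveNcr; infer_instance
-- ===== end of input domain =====

-- B fills the (n+1)x(n+1) Pascal table column-major with a running accumulator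
-- (prefix-sum mod p1 of the previous column) instead of A's row-wise double-read pass;
-- same cost class, different traversal (objective: alternative).


-- 2D read/write helpers shared by both ports (Python's ret[i][j] read / assignment;
-- all indices that actually occur are in range and nonnegative)
def pvGet2 (m : List (List Int)) (i j : Nat) : Int := (m.getD i []).getD j 0
def pvSet2 (m : List (List Int)) (i j : Nat) (v : Int) : List (List Int) :=
  m.set i ((m.getD i []).set j v)

-- ===== PORT A =====
def giveNcr (n : Int) (p1 : Int) : List (List Int) :=
  let ret := (List.range (n+1).toNat).map (fun _ => (List.range (n+1).toNat).map (fun _ => (0:Int)))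
  (List.range (n+1).toNat).foldl (fun ret i =>
    (List.range (i+1)).foldl (fun ret j =>
      pvSet2 ret i j (if j = 0 ∨ j = i then 1
        else PySem.Int.mod (PySem.Int.mod (pvGet2 ret (i-1) (j-1)) p1
              + PySem.Int.mod (pvGet2 ret (i-1) j) p1) p1)) ret) ret

-- ===== PORT B =====
def giveNcr_alt (n : Int) (p1 : Int) : List (List Int) :=
  let N := (n+1).toNat
  let ret0 := (List.range N).map (fun _ => List.replicate N (0:Int))
  let ret1 := (List.range N).foldl (fun ret i => pvSet2 ret i 0 1) ret0
  (List.range' 1 (N-1)).foldl (fun ret j =>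
    ((List.range' (j+1) (N-(j+1))).foldl
      (fun (st : Int × List (List Int)) i =>
        let acc := PySem.Int.mod (st.1 + pvGet2 st.2 (i-1) (j-1)) p1
        (acc, pvSet2 st.2 i j acc))
      ((1:Int), pvSet2 ret j j 1)).2) ret1

-- ===== PRECONDITION & SPEC =====
-- Python A raises ZeroDivisionError exactly when n ≥ 2 and p1 = 0 (the inner mod is
-- first reached at i = 2); those inputs are excluded (B raises there too).
def Pre_giveNcr (n : Int) (p1 : Int) : Prop := p1 ≠ 0 ∨ n < 2
instance (n : Int) (p1 : Int) : Decidable (Pre_giveNcr n p1) := by unfold Pre_giveNcr; infer_instance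
def pvWitness_giveNcr : Int × Int := (5, 3)

def Spec_giveNcr (n : Int) (p1 : Int) (out : List (List Int)) : Prop := out = giveNcr_alt n p1
instance (n : Int) (p1 : Int) (out : List (List Int)) : Decidable (Spec_giveNcr n p1 out) := by unfold Spec_giveNcr; infer_instance

-- ===== CLAIM (what is proved, stated in full; the proofs are below) =====
def Claim_equal_giveNcr : Prop := ∀ (n : Int) (p1 : Int), Dom_giveNcr n p1 → Pre_giveNcr n p1 → Spec_giveNcr n p1 (giveNcr n p1)

-- ===== LEMMAS AND PROOFS =====

-- the common value table: pvT p i j is the entry both programs store at (i,j) for j ≤ i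
def pvT (p : Int) : Nat → Nat → Int
  | 0, _ => 1
  | (i+1), j => if j = 0 ∨ j = i + 1 then 1
      else PySem.Int.mod (PySem.Int.mod (pvT p i (j-1)) p + PySem.Int.mod (pvT p i j) p) p

theorem pvT_zero (p : Int) (i : Nat) : pvT p i 0 = 1 := by
  cases i <;> simp [pvT]

theorem pvT_diag (p : Int) (i : Nat) : pvT p i i = 1 := by
  cases i <;> simp [pvT]

theorem fmod_add_fmod (a b p : Int) :
    (Int.fmod a p + Int.fmod b p).fmod p = (a + b).fmod p := by
  rw [Int.fmod_def a p, Int.fmod_def b p]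
  have h : a - p * a.fdiv p + (b - p * b.fdiv p)
      = (a + b) + p * (-(a.fdiv p + b.fdiv p)) := by ring
  rw [h, Int.add_mul_fmod_self_left]

theorem pvT_step (p : Int) (i j : Nat) (h1 : 1 ≤ j) (hj : j < i) :
    pvT p i j = Int.fmod (pvT p (i-1) j + pvT p (i-1) (j-1)) p := by
  obtain ⟨k, rfl⟩ : ∃ k, i = k + 1 := ⟨i - 1, by omega⟩
  have : ¬ (j = 0 ∨ j = k + 1) := by omega
  show pvT p (k+1) j = _
  rw [pvT, if_neg this]
  show PySem.Int.mod _ _ = _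
  unfold PySem.Int.mod
  rw [fmod_add_fmod, Int.add_comm]
  simp

-- M represents the function f on an N×N grid
def pvRep (N : Nat) (M : List (List Int)) (f : Nat → Nat → Int) : Prop :=
  M.length = N ∧ ∀ i, i < N → (M.getD i []).length = N ∧ ∀ j, j < N → pvGet2 M i j = f i j

theorem pvRep_congr {N M f g} (h : pvRep N M f)
    (hfg : ∀ i j, i < N → j < N → f i j = g i j) : pvRep N M g := by
  obtain ⟨hl, hr⟩ := h
  exact ⟨hl, fun i hi => ⟨(hr i hi).1, fun j hj => ((hr i hi).2 j hj).trans (hfg i j hi hj)⟩⟩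

theorem getD_set_lemma (l : List Int) (i k : Nat) (a : Int) (hk : k < l.length) :
    (l.set i a).getD k 0 = if i = k then a else l.getD k 0 := by
  rw [List.getD_eq_getElem _ _ (by simpa using hk), List.getD_eq_getElem _ _ hk,
    List.getElem_set]

theorem getD_set_row (m : List (List Int)) (i k : Nat) (r : List Int) (hk : k < m.length) :
    (m.set i r).getD k [] = if i = k then r else m.getD k [] := by
  rw [List.getD_eq_getElem _ _ (by simpa using hk), List.getD_eq_getElem _ _ hk,
    List.getElem_set]

theorem pvRep_set {N M f} (h : pvRep N M f) {i j : Nat} (hi : i < N) (_hj : j < N) (v : Int) :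
    pvRep N (pvSet2 M i j v) (fun k l => if k = i ∧ l = j then v else f k l) := by
  obtain ⟨hl, hr⟩ := h
  refine ⟨by simp [pvSet2, hl], fun k hk => ?_⟩
  have hkm : k < M.length := by omega
  have hrow := getD_set_row M i k ((M.getD i []).set j v) hkm
  constructor
  · rw [pvSet2, hrow]
    split
    · simpa using (hr i hi).1
    · exact (hr k hk).1
  · intro l hlN
    unfold pvGet2 pvSet2
    beta_reduce
    rw [hrow]
    by_cases hik : i = k
    · subst hik
      rw [if_pos rfl]
      have hlrow : l < (M.getD i []).length := by rw [(hr i hi).1]; omega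
      rw [getD_set_lemma _ _ _ _ hlrow]
      by_cases hjl : j = l
      · subst hjl
        rw [if_pos rfl, if_pos ⟨rfl, rfl⟩]
      · rw [if_neg hjl, if_neg (by tauto)]
        exact (hr i hi).2 l hlN
    · rw [if_neg hik, if_neg (by tauto)]
      exact (hr k hk).2 l hlN

theorem pvRep_ext {N M M' f g} (h : pvRep N M f) (h' : pvRep N M' g)
    (hfg : ∀ i j, i < N → j < N → f i j = g i j) : M = M' := by
  obtain ⟨hl, hr⟩ := h
  obtain ⟨hl', hr'⟩ := h'
  apply List.ext_getElem (by omega)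
  intro i hi hi'
  have hiN : i < N := by omega
  have a1 := (hr i hiN).1
  have a2 := (hr' i hiN).1
  rw [List.getD_eq_getElem _ _ hi] at a1
  rw [List.getD_eq_getElem _ _ hi'] at a2
  apply List.ext_getElem (by rw [a1, a2])
  intro j hj hj'
  have hjN : j < N := by omega
  have e1 := (hr i hiN).2 j hjN
  have e2 := (hr' i hiN).2 j hjN
  unfold pvGet2 at e1 e2
  rw [List.getD_eq_getElem _ _ hi, List.getD_eq_getElem _ _ hj] at e1
  rw [List.getD_eq_getElem _ _ hi', List.getD_eq_getElem _ _ hj'] at e2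
  rw [e1, e2, hfg i j hiN hjN]

theorem pvRep_init_map (N : Nat) :
    pvRep N ((List.range N).map (fun _ => (List.range N).map (fun _ => (0:Int)))) (fun _ _ => 0) := by
  refine ⟨by simp, fun i hi => ?_⟩
  have hrow : (((List.range N).map (fun _ => (List.range N).map (fun _ => (0:Int)))).getD i [])
      = (List.range N).map (fun _ => (0:Int)) := by
    rw [List.getD_eq_getElem _ _ (by simpa using hi)]
    simp
  refine ⟨by rw [hrow]; simp, fun j hj => ?_⟩
  unfold pvGet2
  rw [hrow, List.getD_eq_getElem _ _ (by simpa using hj)]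
  simp

theorem pvRep_init_rep (N : Nat) :
    pvRep N ((List.range N).map (fun _ => List.replicate N (0:Int))) (fun _ _ => 0) := by
  refine ⟨by simp, fun i hi => ?_⟩
  have hrow : (((List.range N).map (fun _ => List.replicate N (0:Int))).getD i [])
      = List.replicate N (0:Int) := by
    rw [List.getD_eq_getElem _ _ (by simpa using hi)]
    simp
  refine ⟨by rw [hrow]; simp, fun j hj => ?_⟩
  unfold pvGet2
  rw [hrow, List.getD_eq_getElem _ _ (by simpa using hj)]
  simp [List.getElem_replicate]

-- ---------- A's loops ----------

def pvAstep (p1 : Int) (i : Nat) : List (List Int) → Nat → List (List Int) :=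
  fun ret j => pvSet2 ret i j (if j = 0 ∨ j = i then 1
        else PySem.Int.mod (PySem.Int.mod (pvGet2 ret (i-1) (j-1)) p1
              + PySem.Int.mod (pvGet2 ret (i-1) j) p1) p1)

theorem A_row (p1 : Int) (N i : Nat) (hi : i < N) (M : List (List Int))
    (h : pvRep N M (fun k j => if k < i ∧ j ≤ k then pvT p1 k j else 0)) :
    ∀ m, m ≤ i + 1 →
      pvRep N ((List.range m).foldl (pvAstep p1 i) M)
        (fun k j => if (k < i ∧ j ≤ k) ∨ (k = i ∧ j < m) then pvT p1 k j else 0) := by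
  intro m
  induction m with
  | zero => intro _; exact pvRep_congr h (by intro a b _ _; simp)
  | succ m ih =>
    intro hm
    rw [List.range_succ, List.foldl_append, List.foldl_cons, List.foldl_nil]
    have hrep := ih (by omega)
    have hmN : m < N := by omega
    -- identify the stored value with pvT p1 i m
    have hval : (if m = 0 ∨ m = i then (1:Int)
        else PySem.Int.mod (PySem.Int.mod (pvGet2 ((List.range m).foldl (pvAstep p1 i) M) (i-1) (m-1)) p1
              + PySem.Int.mod (pvGet2 ((List.range m).foldl (pvAstep p1 i) M) (i-1) m) p1) p1)
        = pvT p1 i m := by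
      by_cases hc : m = 0 ∨ m = i
      · rw [if_pos hc]
        rcases hc with h0 | hdiag
        · subst h0; exact (pvT_zero p1 i).symm
        · subst hdiag; exact (pvT_diag p1 m).symm
      · rw [if_neg hc]
        have hm1 : 1 ≤ m := by omega
        have hmi : m < i := by omega
        have hi1 : 1 ≤ i := by omega
        have g1 : pvGet2 ((List.range m).foldl (pvAstep p1 i) M) (i-1) (m-1)
            = if (i-1 < i ∧ m-1 ≤ i-1) ∨ (i-1 = i ∧ m-1 < m) then pvT p1 (i-1) (m-1) else 0 :=
          (hrep.2 (i-1) (by omega)).2 (m-1) (by omega)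
        have g2 : pvGet2 ((List.range m).foldl (pvAstep p1 i) M) (i-1) m
            = if (i-1 < i ∧ m ≤ i-1) ∨ (i-1 = i ∧ m < m) then pvT p1 (i-1) m else 0 :=
          (hrep.2 (i-1) (by omega)).2 m (by omega)
        rw [g1, g2, if_pos (by omega : ((i-1 < i ∧ m-1 ≤ i-1) ∨ (i-1 = i ∧ m-1 < m))),
          if_pos (by omega : ((i-1 < i ∧ m ≤ i-1) ∨ (i-1 = i ∧ m < m)))]
        obtain ⟨k, rfl⟩ : ∃ k, i = k + 1 := ⟨i - 1, by omega⟩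
        rw [pvT, if_neg (by omega)]
        simp
    -- pvAstep … is definitionally pvSet2 … with the stored value
    refine pvRep_congr (pvRep_set hrep hi hmN _) ?_
    intro a b _ _
    beta_reduce
    rw [hval]
    by_cases hab : a = i ∧ b = m
    · obtain ⟨rfl, rfl⟩ := hab; simp
    · rw [if_neg hab]
      by_cases h2 : (a < i ∧ b ≤ a) ∨ (a = i ∧ b < m)
      · rw [if_pos h2, if_pos (by omega)]
      · rw [if_neg h2, if_neg (by omega)]

theorem A_outer (p1 : Int) (N : Nat) (M0 : List (List Int)) (h0 : pvRep N M0 (fun _ _ => 0)) :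
    ∀ m, m ≤ N →
      pvRep N ((List.range m).foldl (fun ret i => (List.range (i+1)).foldl (pvAstep p1 i) ret) M0)
        (fun k j => if k < m ∧ j ≤ k then pvT p1 k j else 0) := by
  intro m
  induction m with
  | zero => intro _; exact pvRep_congr h0 (by intro a b _ _; simp)
  | succ m ih =>
    intro hm
    rw [List.range_succ, List.foldl_append, List.foldl_cons, List.foldl_nil]
    have hrow := A_row p1 N m (by omega) _ (ih (by omega)) (m+1) (le_refl _)
    refine pvRep_congr hrow ?_
    intro a b _ _
    beta_reduce
    by_cases hc : a < m + 1 ∧ b ≤ a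
    · rw [if_pos (by omega), if_pos hc]
    · rw [if_neg (by omega), if_neg hc]

-- ---------- B's loops ----------

def pvBcol0 : List (List Int) → Nat → List (List Int) := fun ret i => pvSet2 ret i 0 1

theorem B_col0 (N : Nat) (M0 : List (List Int)) (h0 : pvRep N M0 (fun _ _ => 0)) :
    ∀ m, m ≤ N →
      pvRep N ((List.range m).foldl pvBcol0 M0)
        (fun k l => if l = 0 ∧ k < m then 1 else 0) := by
  intro m
  induction m with
  | zero => intro _; exact pvRep_congr h0 (by intro a b _ _; simp)
  | succ m ih =>
    intro hm
    rw [List.range_succ, List.foldl_append, List.foldl_cons, List.foldl_nil]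
    refine pvRep_congr (pvRep_set (ih (by omega)) (by omega : m < N) (by omega : 0 < N) 1) ?_
    intro a b _ _
    beta_reduce
    by_cases hab : a = m ∧ b = 0
    · obtain ⟨rfl, rfl⟩ := hab; simp
    · rw [if_neg hab]
      by_cases h2 : b = 0 ∧ a < m
      · rw [if_pos h2, if_pos (by omega)]
      · rw [if_neg h2, if_neg (by omega)]

def pvBstep (p1 : Int) (j : Nat) : Int × List (List Int) → Nat → Int × List (List Int) :=
  fun st i =>
    let acc := PySem.Int.mod (st.1 + pvGet2 st.2 (i-1) (j-1)) p1
    (acc, pvSet2 st.2 i j acc)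

theorem B_inner (p1 : Int) (N j : Nat) (hj1 : 1 ≤ j) (hjN : j < N) (M : List (List Int))
    (h : pvRep N M (fun k l => if (l ≤ k ∧ (l < j ∨ (l = j ∧ k ≤ j))) then pvT p1 k l else 0)) :
    ∀ m, j + 1 + m ≤ N →
      ((List.range' (j+1) m).foldl (pvBstep p1 j) ((1:Int), M)).1 = pvT p1 (j+m) j ∧
      pvRep N ((List.range' (j+1) m).foldl (pvBstep p1 j) ((1:Int), M)).2
        (fun k l => if (l ≤ k ∧ (l < j ∨ (l = j ∧ k ≤ j + m))) then pvT p1 k l else 0) := by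
  intro m
  induction m with
  | zero =>
    intro _
    refine ⟨by simpa using (pvT_diag p1 j).symm, ?_⟩
    exact pvRep_congr h (by intro a b _ _; rfl)
  | succ m ih =>
    intro hm
    rw [List.range'_1_concat, List.foldl_append, List.foldl_cons, List.foldl_nil]
    obtain ⟨hacc, hrep⟩ := ih (by omega)
    set st := (List.range' (j+1) m).foldl (pvBstep p1 j) ((1:Int), M) with hst
    have hi : j + 1 + m < N + 1 := by omega
    -- the fetched cell
    have hget : pvGet2 st.2 (j + 1 + m - 1) (j - 1) = pvT p1 (j + m) (j - 1) := by
      have hg := (hrep.2 (j+1+m-1) (by omega)).2 (j-1) (by omega)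
      rw [hg]
      beta_reduce
      rw [if_pos (by omega)]
      congr 1
      omega
    have hidx : j + (m + 1) - 1 = j + m := by omega
    have haccv : PySem.Int.mod (st.1 + pvGet2 st.2 (j + 1 + m - 1) (j - 1)) p1
        = pvT p1 (j + (m+1)) j := by
      rw [hget, hacc, pvT_step p1 (j + (m+1)) j hj1 (by omega), hidx]
      rfl
    constructor
    · show PySem.Int.mod (st.1 + pvGet2 st.2 (j + 1 + m - 1) (j - 1)) p1 = _
      exact haccv
    · show pvRep N (pvSet2 st.2 (j+1+m) j _) _
      refine pvRep_congr (pvRep_set hrep (by omega : j+1+m < N) (by omega : j < N) _) ?_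
      intro a b _ _
      beta_reduce
      rw [haccv]
      by_cases hab : a = j + 1 + m ∧ b = j
      · obtain ⟨rfl, rfl⟩ := hab
        rw [if_pos ⟨rfl, rfl⟩, if_pos (by omega)]
        congr 1
        omega
      · rw [if_neg hab]
        by_cases h2 : (b ≤ a ∧ (b < j ∨ (b = j ∧ a ≤ j + m)))
        · rw [if_pos h2, if_pos (by omega)]
        · rw [if_neg h2, if_neg (by omega)]

def pvBouter (p1 : Int) (N : Nat) : List (List Int) → Nat → List (List Int) :=
  fun ret j =>
    ((List.range' (j+1) (N-(j+1))).foldl (pvBstep p1 j) ((1:Int), pvSet2 ret j j 1)).2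

theorem B_outer (p1 : Int) (N : Nat) (M1 : List (List Int))
    (h1 : pvRep N M1 (fun k l => if l = 0 ∧ k < N then 1 else 0)) :
    ∀ m, m ≤ N - 1 →
      pvRep N ((List.range' 1 m).foldl (pvBouter p1 N) M1)
        (fun k l => if l < 1 + m ∧ l ≤ k then pvT p1 k l else 0) := by
  intro m
  induction m with
  | zero =>
    intro _
    refine pvRep_congr h1 ?_
    intro a b ha _
    by_cases hb : b = 0 ∧ a < N
    · rw [if_pos hb, if_pos (by omega)]
      exact (pvT_zero p1 a).symm ▸ (by rw [hb.1, pvT_zero])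
    · rw [if_neg hb, if_neg (by omega)]
  | succ m ih =>
    intro hm
    rw [List.range'_1_concat, List.foldl_append, List.foldl_cons, List.foldl_nil]
    have hrep := ih (by omega)
    set j := 1 + m with hjdef
    have hj1 : 1 ≤ j := by omega
    have hjN : j < N := by omega
    -- after the diagonal write
    have hdiag : pvRep N (pvSet2 ((List.range' 1 m).foldl (pvBouter p1 N) M1) j j 1)
        (fun k l => if (l ≤ k ∧ (l < j ∨ (l = j ∧ k ≤ j))) then pvT p1 k l else 0) := by
      refine pvRep_congr (pvRep_set hrep hjN hjN 1) ?_
      intro a b _ _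
      beta_reduce
      by_cases hab : a = j ∧ b = j
      · obtain ⟨rfl, rfl⟩ := hab
        rw [if_pos ⟨rfl, rfl⟩, if_pos (by omega), pvT_diag]
      · rw [if_neg hab]
        by_cases h2 : b < j ∧ b ≤ a
        · rw [if_pos h2, if_pos (by omega)]
        · rw [if_neg h2, if_neg (by omega)]
    have hin := (B_inner p1 N j hj1 hjN _ hdiag (N - (j+1)) (by omega)).2
    show pvRep N (pvBouter p1 N ((List.range' 1 m).foldl (pvBouter p1 N) M1) j) _
    unfold pvBouter
    refine pvRep_congr hin ?_
    intro a b ha _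
    by_cases h2 : (b ≤ a ∧ (b < j ∨ (b = j ∧ a ≤ j + (N - (j+1)))))
    · rw [if_pos h2, if_pos (by omega)]
    · rw [if_neg h2, if_neg (by omega)]

-- ---------- assembling ----------

theorem giveNcr_rep (n p1 : Int) :
    pvRep (n+1).toNat (giveNcr n p1)
      (fun k j => if k < (n+1).toNat ∧ j ≤ k then pvT p1 k j else 0) := by
  unfold giveNcr
  exact A_outer p1 (n+1).toNat _ (pvRep_init_map _) (n+1).toNat (le_refl _)

theorem giveNcr_alt_rep (n p1 : Int) :
    pvRep (n+1).toNat (giveNcr_alt n p1)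
      (fun k l => if l < 1 + ((n+1).toNat - 1) ∧ l ≤ k then pvT p1 k l else 0) := by
  unfold giveNcr_alt
  have hcol0 := B_col0 (n+1).toNat _ (pvRep_init_rep _) (n+1).toNat (le_refl _)
  exact B_outer p1 (n+1).toNat _ hcol0 ((n+1).toNat - 1) (le_refl _)

-- ===== VERDICT (by name: the statement is the Claim_ definition above) =====
theorem giveNcr_spec : Claim_equal_giveNcr := by
  intro n p1 _ _
  show giveNcr n p1 = giveNcr_alt n p1
  refine pvRep_ext (giveNcr_rep n p1) (giveNcr_alt_rep n p1) ?_
  intro i j hi hj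
  by_cases hc : i < (n+1).toNat ∧ j ≤ i
  · rw [if_pos hc, if_pos (by omega)]
  · rw [if_neg hc, if_neg (by omega)]
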